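/- GENERATED by tools/from_farm_form.py from prooffarm-gif/accepted/DGifOpen.2/Lemmas.lean (a worked proof of the farm's unit `DGifOpen.2`,
   accepted by the verdict) — do not edit. -/
import Gif.Spec.Units.DGifOpen_2
import Gif.Spec.AllSegs

/-!
  Lemmas for the unit `DGifOpen.2` (dgif_lib.c:186-202: `calloc` of the private object, `memset`, the six checked stores that make
  the reader; on NULL: `*Error`, `free(GifFile)`): the segment is walked in FIVE STEPS that meet at the return addresses of the three
  calls, with private assertions there.

      o2_err_range     `*Error` is NULL or 4 bytes of the stack at or above the caller's side of the return address, off the cursor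
      o2_Win           a window this segment may write: the stack below the body's stack pointer, the heap's region and its shadow, `*Error`
      o2_core_carry    `Core`, `CursorOK`, `Consts` through a footprint of `o2_Win` windows
      o2_zero_carry    `GifZero` through a footprint that misses `[gif + 24, gif + 96)`
      o2_Null          the assertion at ret5 (108729H) when `calloc` returned NULL (the same heap)
      o2_Got           the assertion at ret5 (pv in `rax`) and at ret6 (108747H, pv in `rbp`): the heap owns gif and pv
      o2_Freed         the assertion at ret20 (108868H): `free(gif)` has returned
      o2_seg_calloc    10871AH … calloc … ret5:            `AfterGif` → `o2_Null ∨ o2_Got`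
      o2_seg_null      ret5 … [`*Error = 109`] … free … ret20:   `o2_Null` → `o2_Freed`
      o2_seg_exit      ret20 … 108816H:                    `o2_Freed` → `Exit`
      o2_seg_memset    ret5 … memset … ret6:               `o2_Got ret5 rax` → `o2_Got ret6 rbp`
      o2_seg_stores    ret6 … six checked stores … 10879EH: `o2_Got ret6 rbp` → `Opened` (THE FOREST IS ESTABLISHED)
-/

open X86 X86.User Asan ProgX.Base ProgX.Base.Spec Gif.Spec

set_option maxRecDepth 4000
set_option maxHeartbeats 4000000

namespace Gif.Spec.DGifOpen_2

/-- **Where `*Error` is**: NULL, or 4 bytes of the stack region at or above the caller's side of the return address (a stack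
object of a CALLER's protected frame), off the cursor. -/
theorem o2_err_range {H : Heap} {rest : List Obj} {frames : List (Nat × FrameLayout)} {R : Rd} {e : State} {p : Nat}
    (h : ErrPtr H rest frames R p) (hpre : HeapPre H rest frames e) :
    p = 0 ∨ ((e.reg .rsp).toNat + 8 ≤ p ∧ p + 4 ≤ 0x800000 ∧ (p + 4 ≤ R.cur ∨ R.cur + 16 ≤ p)) := by
  rcases h with h0 | ⟨hl, hlo, hhi, hoffc⟩
  · left
    exact h0
  · right
    refine ⟨?_, hhi, hoffc⟩
    obtain ⟨o, ho, h1, h2⟩ := hl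
    rcases List.mem_append.mp ho with hst | hoth
    · obtain ⟨bF, hbF, g1, _⟩ := ShadowInv.stackObj_gran hpre.inv.shadow.stack hst
      obtain ⟨_, a8, atop, _, _⟩ := hpre.inv.shadow.stack.active bF hbF
      unfold Obj.gLo at g1
      omega
    · exfalso
      rcases List.mem_append.mp hoth with hheap | hrest
      · obtain ⟨⟨c, hlive⟩, _⟩ := Heap.live_of_mem_liveObjs hheap
        have hr := hpre.inv.heap.obj_range hlive
        have hbase := hpre.base
        simp only at hr
        omega
      · have hoff := hpre.inv.shadow.off o (List.mem_append_right _ hrest)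
        unfold OffStack at hoff
        omega

/-- **A window this segment may write**: the function's stack below the body's stack pointer, the heap's region with its shadow
(the contract's coarse window), or the 4 bytes of `*Error`. -/
def o2_Win (e : State) (w : Span) : Prop :=
  ((e.reg .rsp).toNat - 528 ≤ w.lo ∧ w.hi ≤ (e.reg .rsp).toNat - 120) ∨
  (0x800000 ≤ w.lo ∧ w.hi ≤ 0x1000020) ∨
  ((e.reg .rdx).toNat ≤ w.lo ∧ w.hi ≤ (e.reg .rdx).toNat + 4)

/-- **`Core`, the cursor and the constants through the stores of this segment**: `v` has `Core`, `s` is a later state with the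
body's stack pointer and `r12`, and every window written since is an `o2_Win`. -/
theorem o2_core_carry {cut cut' : Word} {H : Heap} {rest : List Obj} {frames : List (Nat × FrameLayout)} {R : Rd}
    {u₀ e : State} {ret : Word} {v s : State} {ws : List Span}
    (hb : DGifOpen.Core cut H rest frames R u₀ e ret v)
    (hcursor : CursorOK R v.mem) (hconsts : Consts v.mem)
    (hs : Mem.SameExcept ws v.mem s.mem) (hws : ∀ w, w ∈ ws → o2_Win e w)
    (hrip : s.rip = cut') (hrsp : s.reg .rsp = e.reg .rsp - 120) (hr12 : s.reg .r12 = v.reg .r12)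
    (hcode : (conv u₀).code.In s.mem) (habi : (conv u₀).inv s) :
    DGifOpen.Core cut' H rest frames R u₀ e ret s ∧ CursorOK R s.mem ∧ Consts s.mem := by
  have he_room : 0x700000 + 528 ≤ (e.reg .rsp).toNat := hb.entry.room
  have he_top : (e.reg .rsp).toNat + 8 ≤ 0x800000 := hb.entry.top
  obtain ⟨hheap, hctx, hcur0, hconsts0, hrdi, hrsi, herr⟩ := hb.pre
  have hcur := hctx.cursor_range hheap.inv.shadow
  have herr' := o2_err_range herr hheap
  -- what lies above the body's stack pointer, below the heap and off `*Error` is not written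
  have hmiss : ∀ a k, (e.reg .rsp).toNat - 120 ≤ a → a + k ≤ 0x800000 →
      (a + k ≤ (e.reg .rdx).toNat ∨ (e.reg .rdx).toNat + 4 ≤ a) → ∀ w, w ∈ ws → a + k ≤ w.lo ∨ w.hi ≤ a := by
    intro a k h1 h2 h3 w hw
    rcases hws w hw with ⟨p, q⟩ | ⟨p, q⟩ | ⟨p, q⟩
    · omega
    · omega
    · omega
  have hslots : ∀ a k, (e.reg .rsp).toNat - 120 ≤ a → a + k ≤ (e.reg .rsp).toNat + 8 →
      ∀ w, w ∈ ws → a + k ≤ w.lo ∨ w.hi ≤ a := by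
    intro a k h1 h2
    apply hmiss a k h1 (by omega)
    omega
  have hoffcur : ∀ w, w ∈ ws → w.hi ≤ R.cur ∨ R.cur + 16 ≤ w.lo := by
    intro w hw
    have := hmiss R.cur 16 (by omega) (by omega) (by omega) w hw
    omega
  have e_rem : Gif.Spec.rem R s.mem = Gif.Spec.rem R v.mem := rem_sameExcept hs (by omega) hoffcur
  have hsameE : Mem.SameExcept
      [⟨(e.reg .rsp).toNat - 528, (e.reg .rsp).toNat⟩,
       shadowSpan ((e.reg .rsp).toNat - 120) ((e.reg .rsp).toNat - 56),
       ⟨0x800000, 0x1000020⟩,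
       ⟨(e.reg .rdx).toNat, (e.reg .rdx).toNat + 4⟩,
       ⟨R.cur, R.cur + 8⟩] e.mem s.mem := by
    apply Mem.SameExcept.step_same' hb.same hs
    intro w hw
    by_cases hempty : w.hi ≤ w.lo
    · left
      exact hempty
    right
    rcases hws w hw with ⟨a, b⟩ | ⟨a, b⟩ | ⟨a, b⟩
    · exact ⟨⟨(e.reg .rsp).toNat - 528, (e.reg .rsp).toNat⟩, by simp only [List.mem_cons, true_or], by simp only; omega,
        by simp only; omega⟩
    · exact ⟨⟨0x800000, 0x1000020⟩, by simp only [List.mem_cons, true_or, or_true], by simp only; omega, by simp only; omega⟩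
    · exact ⟨⟨(e.reg .rdx).toNat, (e.reg .rdx).toNat + 4⟩, by simp only [List.mem_cons, true_or, or_true], by simp only; omega,
        by simp only; omega⟩
  refine ⟨⟨hb.entry, hb.pre, hrip, hrsp, hr12.trans hb.r12, ?_, ?_, ?_, ?_, ?_, ?_, ?_, ?_, hsameE, hcode, habi⟩, ?_, ?_⟩
  · exact slot_sameExcept hs (e.reg .rsp) 8 8 _ (by omega) (by omega) hb.slot_r15 (hslots _ _ (by omega) (by omega))
  · exact slot_sameExcept hs (e.reg .rsp) 16 8 _ (by omega) (by omega) hb.slot_r14 (hslots _ _ (by omega) (by omega))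
  · exact slot_sameExcept hs (e.reg .rsp) 24 8 _ (by omega) (by omega) hb.slot_r13 (hslots _ _ (by omega) (by omega))
  · exact slot_sameExcept hs (e.reg .rsp) 32 8 _ (by omega) (by omega) hb.slot_r12 (hslots _ _ (by omega) (by omega))
  · exact slot_sameExcept hs (e.reg .rsp) 40 8 _ (by omega) (by omega) hb.slot_rbp (hslots _ _ (by omega) (by omega))
  · exact slot_sameExcept hs (e.reg .rsp) 48 8 _ (by omega) (by omega) hb.slot_rbx (hslots _ _ (by omega) (by omega))
  · rw [hs.readLE (e.reg .rsp) 8 (by omega) (hslots _ _ (by omega) (by omega))]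
    exact hb.slot_ra
  · rw [e_rem]
    exact hb.rem
  · exact hcursor.sameExcept hs (by omega) hoffcur
  · apply hconsts.sameExcept hs
    intro w hw
    rcases hws w hw with ⟨p, q⟩ | ⟨p, q⟩ | ⟨p, q⟩
    · omega
    · omega
    · omega


/-- **The six zero fields of gif through a footprint that misses `[gif + 24, gif + 96)`.** -/
theorem o2_zero_carry {mem mem' : Mem} {gif : Nat} {ws : List Span} (h : DGifOpen.GifZero mem gif)
    (hs : Mem.SameExcept ws mem mem') (hg : gif + 120 < 2 ^ 64)
    (hw : ∀ w, w ∈ ws → w.hi ≤ gif + 24 ∨ gif + 96 ≤ w.lo) : DGifOpen.GifZero mem' gif := by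
  obtain ⟨k1, k2, k3, k4, k5, k6⟩ := h
  simp only [gfield] at k1 k2 k3 k4 k5 k6
  have hd : ∀ a n, gif + 24 ≤ a → a + n ≤ gif + 96 → ∀ w ∈ ws, a + n ≤ w.lo ∨ w.hi ≤ a := by
    intro a n h1 h2 w hin
    have := hw w hin
    omega
  refine ⟨?_, ?_, ?_, ?_, ?_, ?_⟩
  · simp only [gfield]
    rw [hs.rd (gif + 24) 8 (by omega) (hd _ _ (by omega) (by omega))]
    exact k1
  · simp only [gfield]
    rw [hs.rd (gif + 32) 4 (by omega) (hd _ _ (by omega) (by omega))]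
    exact k2
  · simp only [gfield]
    rw [hs.rd (gif + 64) 8 (by omega) (hd _ _ (by omega) (by omega))]
    exact k3
  · simp only [gfield]
    rw [hs.rd (gif + 72) 8 (by omega) (hd _ _ (by omega) (by omega))]
    exact k4
  · simp only [gfield]
    rw [hs.rd (gif + 80) 4 (by omega) (hd _ _ (by omega) (by omega))]
    exact k5
  · simp only [gfield]
    rw [hs.rd (gif + 88) 8 (by omega) (hd _ _ (by omega) (by omega))]
    exact k6

/-- **At 108729H (ret5), `calloc(1, 24936)` has returned NULL**: the same heap `Hc`, nothing written but stack. -/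
structure o2_Null (H : Heap) (rest : List Obj) (frames : List (Nat × FrameLayout)) (R : Rd) (Hc : Heap) (gif : Nat)
    (u₀ e : State) (ret : Word) (v : State) : Prop where
  core : DGifOpen.Core Gif.L.DGifOpen.ret5 H rest frames R u₀ e ret v
  r13 : v.reg .r13 = e.reg .rdx
  rbx : (v.reg .rbx).toNat = gif
  rax : v.reg .rax = 0
  region : SameRegion H Hc
  inv : HeapInv Hc rest (DGifOpen.framesIn frames e) ((e.reg .rsp).toNat - 120) v.mem
  own : Owns Hc [(gif, 120)]
  cursor : CursorOK R v.mem
  consts : Consts v.mem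

/-- **The private object exists** (at `cut`; its address `pv` in the register `ptr`: `rax` at 108729H behind `calloc`, `rbp` at
108747H behind `memset`): the present heap `Hc` owns gif and pv, the six fields of gif still read 0. -/
structure o2_Got (cut : Word) (ptr : Reg) (H : Heap) (rest : List Obj) (frames : List (Nat × FrameLayout)) (R : Rd) (Hc : Heap)
    (gif pv : Nat) (u₀ e : State) (ret : Word) (v : State) : Prop where
  core : DGifOpen.Core cut H rest frames R u₀ e ret v
  r13 : v.reg .r13 = e.reg .rdx
  r14 : v.reg .r14 = e.reg .rdi
  r15 : v.reg .r15 = e.reg .rsi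
  rbx : (v.reg .rbx).toNat = gif
  ptr : (v.reg ptr).toNat = pv
  region : SameRegion H Hc
  inv : HeapInv Hc rest (DGifOpen.framesIn frames e) ((e.reg .rsp).toNat - 120) v.mem
  own : Owns Hc [(gif, 120), (pv, 24936)]
  zero : DGifOpen.GifZero v.mem gif
  cursor : CursorOK R v.mem
  consts : Consts v.mem

/-- **10871AH … the call of calloc … 108729H (ret5)** (dgif_lib.c:186 `calloc(1, sizeof(GifFilePrivateType))`). -/
theorem o2_seg_calloc (Lay : Layout) (hLay : Lay.hi = 0x1000000) (μ : Microarch) (hμ : UserX.MicroOK μ) (u₀ : State)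
    (hcode : HasCodeNat Lay u₀ Gif.L.DGifOpen.entry Gif.Code.code_DGifOpen.nat Gif.L.DGifOpen.size)
    (H : Heap) (rest : List Obj) (frames : List (Nat × FrameLayout)) (R : Rd) (Hc : Heap) (gif : Nat) (e : State) (ret : Word)
    (h_calloc : Calls Lay μ ProgX.Base.WayInv (ProgX.Base.conv u₀) ProgX.Base.L.calloc.entry
      (ProgX.Base.Spec.calloc.spec Hc rest (DGifOpen.framesIn frames e)))
    (v : State) (hat : DGifOpen.AfterGif H rest frames R Hc gif u₀ e ret v) :
    ReachVia Lay μ ProgX.Base.WayInv v (fun w =>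
      o2_Null H rest frames R Hc gif u₀ e ret w ∨
      o2_Got Gif.L.DGifOpen.ret5 .rax H rest frames R (Hc.push 24936 (r16 24936)) gif Hc.next u₀ e ret w) := by
  obtain ⟨hcore, c_r13, c_r14, c_r15, c_rbx, hregion, hinv, hown, hzero, hcursor, hconsts⟩ := hat
  have he := hcore.entry
  v_entry he
  obtain ⟨hheap, hctx, hcur0, hconsts0, hrdi, hrsi, herr⟩ := hcore.pre
  have w_rip := hcore.rip
  have c_rsp : v.reg .rsp = e.reg .rsp - 120 := hcore.rsp
  have w_kept : RegsKept [.rsp] v v := RegsKept.refl _ _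
  have w_eq : Mem.EqOn ProgX.Base.L.textLo ProgX.Base.L.textHi u₀.mem v.mem := ProgX.Base.conv_code_eqOn hcore.code
  have hdf := (show abiInv _ from hcore.abi).1
  have hmx := (show abiInv _ from hcore.abi).2
  have hsse := ProgX.Base.sseOK_of_abiInv hcore.abi
  have hcur := hctx.cursor_range hheap.inv.shadow
  -- where gif and the next object are, as numbers
  have hbasec : Hc.base = 0x800000 := hregion.1.trans hheap.base
  have hlimitc : Hc.limit = 0xC00000 := hregion.2.trans hheap.limit
  obtain ⟨cg, hlg⟩ := hown.live (gif, 120) List.mem_cons_self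
  have hg1 := hinv.heap.obj_range hlg
  have hg2 := hinv.heap.next_above hlg
  have hg3 := hinv.heap.size_le_cap hlg
  have hroom := hinv.heap.room
  have hnext := Hc.next_def
  simp only at hg1 hg2 hg3
  rw [hbasec] at hg1 hnext
  rw [hbasec, hlimitc] at hroom
  u_walk hcode [hμ.vendor] until [Gif.L.DGifOpen.ret5] span [ProgX.Base.L.textLo, ProgX.Base.L.textHi] side (v_side)
  case call_inv =>
    v_inv
  case pre_108724 =>
    -- calloc's precondition: the heap's invariant over the pushed return address
    have e_rsp : (s_108724.reg .rsp).toNat + 8 = (e.reg .rsp).toNat - 120 := by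
      rw [w_rsp]
      u_omega
    refine ⟨?_, hbasec, hlimitc, hheap.text, hheap.offText⟩
    rw [e_rsp, w_mem]
    exact hinv.writeLE_out _ _ _ (by u_omega) (by rw [hbasec]; left; u_omega) (by left; u_omega)
  -- 0x108729 (ret5): calloc has returned
  have e_n : (s_108724.reg .rdi).toNat * (s_108724.reg .rsi).toNat = 24936 := by
    rw [w_rdi_108724, w_rsi_108724]
    decide
  have e_top : (s_108724.reg .rsp).toNat + 8 = (e.reg .rsp).toNat - 120 := by
    rw [w_rsp_108724]
    u_omega
  obtain ⟨hpost, _⟩ : AllocPost Hc rest (DGifOpen.framesIn frames e) 96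
      ((s_108724.reg .rdi).toNat * (s_108724.reg .rsi).toNat) (r16 ((s_108724.reg .rdi).toNat * (s_108724.reg .rsi).toNat))
      s_108724 s_108724r ∧ _ := w_post
  rw [e_n] at hpost
  by_cases hfit : Hc.Fits (r16 24936)
  · -- THE ALLOCATION FITS: `pv = Hc.next`, the heap `Hc.push 24936 (r16 24936)`
    obtain ⟨hrax, hinv'⟩ := hpost.1 hfit
    have hfit' := hfit.next_le
    have e16 : r16 24936 = 24944 := by decide
    rw [e16, hlimitc] at hfit'
    rw [e_top] at hinv'
    v_after_call w_rsp_108724 w_mem_108724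
    simp only [e_n, shadowSpan] at w_same
    -- the footprint since `v`: the stack below the body's stack pointer and calloc's four windows
    have hs : Mem.SameExcept
        [⟨(e.reg .rsp).toNat - 528, (e.reg .rsp).toNat - 120⟩,
         ⟨0x800000, 0x800008⟩,
         ⟨Hc.next - 32, Hc.next - 8⟩,
         ⟨0xC00000 + Hc.next / 8, 0xC00000 + (Hc.next + 24936 + 7) / 8⟩,
         ⟨Hc.next, Hc.next + 24936⟩] v.mem s_108724r.mem := by u_same
    have hwin : ∀ w, w ∈ [(⟨(e.reg .rsp).toNat - 528, (e.reg .rsp).toNat - 120⟩ : Span),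
         ⟨0x800000, 0x800008⟩,
         ⟨Hc.next - 32, Hc.next - 8⟩,
         ⟨0xC00000 + Hc.next / 8, 0xC00000 + (Hc.next + 24936 + 7) / 8⟩,
         ⟨Hc.next, Hc.next + 24936⟩] → o2_Win e w := by
      intro w hw
      unfold o2_Win
      simp only [List.mem_cons, List.not_mem_nil, or_false] at hw
      rcases hw with rfl | rfl | rfl | rfl | rfl
      · left
        simp only
        omega
      · right
        left
        simp only
        omega
      · right
        left
        simp only
        omega
      · right
        left
        simp only
        omega
      · right
        left
        simp only
        omega
    obtain ⟨kcore, kcursor, kconsts⟩ :=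
      o2_core_carry (cut' := Gif.L.DGifOpen.ret5) hcore hcursor hconsts hs hwin w_rip w_rsp (w_kept.get .r12 rfl) w_code w_inv
    -- the six zero fields of gif: every window lies off `[gif + 24, gif + 96)`
    have kzero : DGifOpen.GifZero s_108724r.mem gif := by
      apply o2_zero_carry hzero hs (by omega)
      intro w hw
      simp only [List.mem_cons, List.not_mem_nil, or_false] at hw
      rcases hw with rfl | rfl | rfl | rfl | rfl
      · simp only
        omega
      · simp only
        omega
      · simp only
        omega
      · simp only
        omega
      · simp only
        omega
    refine ReachVia.done (Or.inr ?_)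
    exact {
      core := kcore
      r13 := (w_kept.get .r13 rfl).trans c_r13
      r14 := (w_kept.get .r14 rfl).trans c_r14
      r15 := (w_kept.get .r15 rfl).trans c_r15
      rbx := by
        rw [w_kept.get .rbx rfl]
        exact c_rbx
      ptr := hrax
      region := hregion.trans (SameRegion.push Hc 24936 (r16 24936))
      inv := hinv'
      own := (hown.push_cons hinv.heap 24936 (r16 24936)).perm (List.Perm.swap (gif, 120) (Hc.next, 24936) [])
      zero := kzero
      cursor := kcursor
      consts := kconsts
    }
  · -- THE ALLOCATION DOES NOT FIT: NULL, the same heap, nothing written but calloc's stack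
    obtain ⟨hrax, hinv', hun, hstack⟩ := hpost.2 hfit
    rw [e_top] at hinv'
    clear w_same
    have w_same := hstack
    rw [w_rsp_108724, w_mem_108724] at w_same
    have hs : Mem.SameExcept [⟨(e.reg .rsp).toNat - 528, (e.reg .rsp).toNat - 120⟩] v.mem s_108724r.mem := by u_same
    have hwin : ∀ w, w ∈ [(⟨(e.reg .rsp).toNat - 528, (e.reg .rsp).toNat - 120⟩ : Span)] → o2_Win e w := by
      intro w hw
      unfold o2_Win
      simp only [List.mem_cons, List.not_mem_nil, or_false] at hw
      rcases hw with rfl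
      left
      simp only
      omega
    obtain ⟨kcore, kcursor, kconsts⟩ :=
      o2_core_carry (cut' := Gif.L.DGifOpen.ret5) hcore hcursor hconsts hs hwin w_rip w_rsp (w_kept.get .r12 rfl) w_code w_inv
    refine ReachVia.done (Or.inl ?_)
    exact {
      core := kcore
      r13 := (w_kept.get .r13 rfl).trans c_r13
      rbx := by
        rw [w_kept.get .rbx rfl]
        exact c_rbx
      rax := hrax
      region := hregion
      inv := hinv'
      own := hown
      cursor := kcursor
      consts := kconsts
    }

/-- **At 108868H (ret20), `free(gif)` has returned** on the NULL arm of `calloc`: the heap `Hc` (= the one before with gif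
released) has its invariant; `rbp = 0` is the result to be. -/
structure o2_Freed (H : Heap) (rest : List Obj) (frames : List (Nat × FrameLayout)) (R : Rd) (Hc : Heap)
    (u₀ e : State) (ret : Word) (v : State) : Prop where
  core : DGifOpen.Core Gif.L.DGifOpen.ret20 H rest frames R u₀ e ret v
  rbp : v.reg .rbp = 0
  region : SameRegion H Hc
  inv : HeapInv Hc rest (DGifOpen.framesIn frames e) ((e.reg .rsp).toNat - 120) v.mem
  cursor : CursorOK R v.mem
  consts : Consts v.mem

/-- **108729H (ret5) … 10884BH … the call of free … 108868H (ret20)**, `calloc` returned NULL (dgif_lib.c:187-191): `*Error =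
D_GIF_ERR_NOT_ENOUGH_MEM` if `Error` is not NULL (a checked store into the caller's frame), `free(GifFile)`. -/
theorem o2_seg_null (Lay : Layout) (hLay : Lay.hi = 0x1000000) (μ : Microarch) (hμ : UserX.MicroOK μ) (u₀ : State)
    (hcode : HasCodeNat Lay u₀ Gif.L.DGifOpen.entry Gif.Code.code_DGifOpen.nat Gif.L.DGifOpen.size)
    (H : Heap) (rest : List Obj) (frames : List (Nat × FrameLayout)) (R : Rd) (Hc : Heap) (gif : Nat) (e : State) (ret : Word)
    (h_free : Calls Lay μ ProgX.Base.WayInv (ProgX.Base.conv u₀) ProgX.Base.L.free.entry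
      (ProgX.Base.Spec.free.spec Hc rest (DGifOpen.framesIn frames e) 120))
    (h_asan_store4_noabort : Asan.SmallCheck Lay μ ProgX.Base.WayInv (ProgX.Base.CodeOK u₀) [.rax, .rcx, .rdx] 4
      ProgX.Base.L.__asan_store4_noabort.entry)
    (v : State) (hat : o2_Null H rest frames R Hc gif u₀ e ret v) :
    ReachVia Lay μ ProgX.Base.WayInv v (o2_Freed H rest frames R (Hc.release gif) u₀ e ret) := by
  obtain ⟨hcore, c_r13, c_rbx, c_rax, hregion, hinv, hown, hcursor, hconsts⟩ := hat
  have he := hcore.entry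
  v_entry he
  obtain ⟨hheap, hctx, hcur0, hconsts0, hrdi, hrsi, herr⟩ := hcore.pre
  have w_rip := hcore.rip
  have c_rsp : v.reg .rsp = e.reg .rsp - 120 := hcore.rsp
  have w_kept : RegsKept [.rsp] v v := RegsKept.refl _ _
  have w_eq : Mem.EqOn ProgX.Base.L.textLo ProgX.Base.L.textHi u₀.mem v.mem := ProgX.Base.conv_code_eqOn hcore.code
  have hdf := (show abiInv _ from hcore.abi).1
  have hmx := (show abiInv _ from hcore.abi).2
  have hsse := ProgX.Base.sseOK_of_abiInv hcore.abi
  have hcur := hctx.cursor_range hheap.inv.shadow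
  have herr' := o2_err_range herr hheap
  have hbasec : Hc.base = 0x800000 := hregion.1.trans hheap.base
  have hlimitc : Hc.limit = 0xC00000 := hregion.2.trans hheap.limit
  -- where gif is, as numbers
  have hglive : Hc.Live gif 120 := hown.live (gif, 120) List.mem_cons_self
  obtain ⟨cg, hlg⟩ := hglive
  have hg1 := hinv.heap.obj_range hlg
  have hg3 := hinv.heap.size_le_cap hlg
  have hroom := hinv.heap.room
  simp only at hg1 hg3
  rw [hbasec] at hg1
  rw [hbasec, hlimitc] at hroom
  have hglive : Hc.Live gif 120 := ⟨cg, hlg⟩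
  by_cases hp0 : (e.reg .rdx).toNat = 0
  · -- `Error == NULL` (10884EH taken): straight to `free(GifFile)`
    u_walk hcode [hμ.vendor] until [Gif.L.DGifOpen.ret20] span [ProgX.Base.L.textLo, ProgX.Base.L.textHi] side (v_side)
    case call_inv =>
      v_inv
    case pre_108863 =>
      have e_rsp : (s_108863.reg .rsp).toNat + 8 = (e.reg .rsp).toNat - 120 := by
        rw [w_rsp]
        u_omega
      refine ⟨⟨?_, hbasec, hlimitc, hheap.text, hheap.offText⟩, Or.inr ?_⟩
      · rw [e_rsp, w_mem]
        exact hinv.writeLE_out _ _ _ (by u_omega) (by rw [hbasec]; left; u_omega) (by left; u_omega)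
      · rw [w_rdi, c_rbx]
        exact hglive
    -- 0x108868 (ret20): `free(GifFile)` has returned: the heap is `Hc.release gif`
    have hne : (s_108863.reg .rdi).toNat ≠ 0 := by
      rw [w_rdi_108863, c_rbx]
      omega
    have hinv2 := w_post.2 hne
    have e_top : (s_108863.reg .rsp).toNat + 8 = (e.reg .rsp).toNat - 120 := by
      rw [w_rsp_108863]
      u_omega
    rw [w_rdi_108863, c_rbx, e_top] at hinv2
    clear w_post
    v_after_call w_rsp_108863 w_mem_108863
    simp only [shadowSpan, w_rdi_108863, c_rbx] at w_same
    have hs : Mem.SameExcept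
        [⟨(e.reg .rsp).toNat - 528, (e.reg .rsp).toNat - 120⟩,
         ⟨gif - 24, gif - 16⟩,
         ⟨0xC00000 + gif / 8, 0xC00000 + (gif + 120 + 7) / 8⟩] v.mem s_108863r.mem := by u_same
    have hwin : ∀ w, w ∈ [(⟨(e.reg .rsp).toNat - 528, (e.reg .rsp).toNat - 120⟩ : Span),
         ⟨gif - 24, gif - 16⟩,
         ⟨0xC00000 + gif / 8, 0xC00000 + (gif + 120 + 7) / 8⟩] → o2_Win e w := by
      intro w hw
      unfold o2_Win
      simp only [List.mem_cons, List.not_mem_nil, or_false] at hw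
      rcases hw with rfl | rfl | rfl
      · left
        simp only
        omega
      · right
        left
        simp only
        omega
      · right
        left
        simp only
        omega
    obtain ⟨kcore, kcursor, kconsts⟩ :=
      o2_core_carry (cut' := Gif.L.DGifOpen.ret20) hcore hcursor hconsts hs hwin w_rip w_rsp (w_kept.get .r12 rfl) w_code w_inv
    refine ReachVia.done ?_
    exact {
      core := kcore
      rbp := w_rbp
      region := hregion.trans (SameRegion.release Hc gif)
      inv := hinv2
      cursor := kcursor
      consts := kconsts
    }
  · -- `Error != NULL`: the checked store `*Error = 109`, then `free(GifFile)`
    have hperr : (e.reg .rsp).toNat + 8 ≤ (e.reg .rdx).toNat ∧ (e.reg .rdx).toNat + 4 ≤ 0x800000 ∧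
        ((e.reg .rdx).toNat + 4 ≤ R.cur ∨ R.cur + 16 ≤ (e.reg .rdx).toNat) := by
      rcases herr' with h0 | h1
      · exact absurd h0 hp0
      · exact h1
    clear herr'
    obtain ⟨hpe1, hpe2, hpe3⟩ := hperr
    u_walk hcode [hμ.vendor] until [Gif.L.DGifOpen.ret20] span [ProgX.Base.L.textLo, ProgX.Base.L.textHi] side (v_side)
    case check_108853 =>
      -- dgif_lib.c:189 the store of `*Error`: 4 bytes of a stack object of a caller's frame
      have hun : ShadowUntouched v.mem s_108853.mem := by v_untouched
      have hl : LiveIn (Hc.liveObjs ++ rest) (DGifOpen.framesIn frames e) (e.reg .rdx).toNat 4 :=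
        DGifOpen.errLive herr hp0 hheap.inv Hc _
      exact hl.accSmall hinv.shadow hun _ 4 (by decide) (by u_omega) (by u_omega)
    case call_inv =>
      v_inv
    case pre_108863 =>
      have e_rsp : (s_108863.reg .rsp).toNat + 8 = (e.reg .rsp).toNat - 120 := by
        rw [w_rsp]
        u_omega
      have hun : ShadowUntouched v.mem s_108863.mem := by v_untouched
      have hs0 : Mem.SameExcept
          [⟨(e.reg .rsp).toNat - 528, (e.reg .rsp).toNat - 120⟩,
           ⟨(e.reg .rdx).toNat, (e.reg .rdx).toNat + 4⟩] v.mem s_108863.mem := by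
        rw [w_mem]
        u_same
      refine ⟨⟨?_, hbasec, hlimitc, hheap.text, hheap.offText⟩, Or.inr ?_⟩
      · rw [e_rsp]
        apply hinv.sameExcept hun hs0
        intro w hw
        simp only [List.mem_cons, List.not_mem_nil, or_false] at hw
        left
        left
        rw [hbasec]
        rcases hw with rfl | rfl
        · simp only
          omega
        · simp only
          omega
      · rw [w_rdi, c_rbx]
        exact hglive
    -- 0x108868 (ret20): `free(GifFile)` has returned: the heap is `Hc.release gif`
    have hne : (s_108863.reg .rdi).toNat ≠ 0 := by
      rw [w_rdi_108863, c_rbx]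
      omega
    have hinv2 := w_post.2 hne
    have e_top : (s_108863.reg .rsp).toNat + 8 = (e.reg .rsp).toNat - 120 := by
      rw [w_rsp_108863]
      u_omega
    rw [w_rdi_108863, c_rbx, e_top] at hinv2
    clear w_post
    v_after_call w_rsp_108863 w_mem_108863
    simp only [shadowSpan, w_rdi_108863, c_rbx] at w_same
    have hs : Mem.SameExcept
        [⟨(e.reg .rsp).toNat - 528, (e.reg .rsp).toNat - 120⟩,
         ⟨gif - 24, gif - 16⟩,
         ⟨0xC00000 + gif / 8, 0xC00000 + (gif + 120 + 7) / 8⟩,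
         ⟨(e.reg .rdx).toNat, (e.reg .rdx).toNat + 4⟩] v.mem s_108863r.mem := by u_same
    have hwin : ∀ w, w ∈ [(⟨(e.reg .rsp).toNat - 528, (e.reg .rsp).toNat - 120⟩ : Span),
         ⟨gif - 24, gif - 16⟩,
         ⟨0xC00000 + gif / 8, 0xC00000 + (gif + 120 + 7) / 8⟩,
         ⟨(e.reg .rdx).toNat, (e.reg .rdx).toNat + 4⟩] → o2_Win e w := by
      intro w hw
      unfold o2_Win
      simp only [List.mem_cons, List.not_mem_nil, or_false] at hw
      rcases hw with rfl | rfl | rfl | rfl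
      · left
        simp only
        omega
      · right
        left
        simp only
        omega
      · right
        left
        simp only
        omega
      · right
        right
        simp only
        omega
    obtain ⟨kcore, kcursor, kconsts⟩ :=
      o2_core_carry (cut' := Gif.L.DGifOpen.ret20) hcore hcursor hconsts hs hwin w_rip w_rsp (w_kept.get .r12 rfl) w_code w_inv
    refine ReachVia.done ?_
    exact {
      core := kcore
      rbp := w_rbp
      region := hregion.trans (SameRegion.release Hc gif)
      inv := hinv2
      cursor := kcursor
      consts := kconsts
    }

/-- **108868H (ret20) … 108816H** (dgif_lib.c:192 `return NULL`): `rbx = rbp = 0`, to the epilogue. -/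
theorem o2_seg_exit (Lay : Layout) (hLay : Lay.hi = 0x1000000) (μ : Microarch) (hμ : UserX.MicroOK μ) (u₀ : State)
    (hcode : HasCodeNat Lay u₀ Gif.L.DGifOpen.entry Gif.Code.code_DGifOpen.nat Gif.L.DGifOpen.size)
    (H : Heap) (rest : List Obj) (frames : List (Nat × FrameLayout)) (R : Rd) (Hc : Heap) (e : State) (ret : Word)
    (v : State) (hat : o2_Freed H rest frames R Hc u₀ e ret v) :
    ReachVia Lay μ ProgX.Base.WayInv v (DGifOpen.Exit H rest frames R u₀ e ret) := by
  obtain ⟨hcore, c_rbp, hregion, hinv, hcursor, hconsts⟩ := hat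
  have he := hcore.entry
  v_entry he
  have w_rip := hcore.rip
  have c_rsp : v.reg .rsp = e.reg .rsp - 120 := hcore.rsp
  have w_kept : RegsKept [.rsp] v v := RegsKept.refl _ _
  have w_eq : Mem.EqOn ProgX.Base.L.textLo ProgX.Base.L.textHi u₀.mem v.mem := ProgX.Base.conv_code_eqOn hcore.code
  have hdf := (show abiInv _ from hcore.abi).1
  have hmx := (show abiInv _ from hcore.abi).2
  have hsse := ProgX.Base.sseOK_of_abiInv hcore.abi
  u_walk hcode [hμ.vendor] until [Gif.L.DGifOpen.at_108816] span [ProgX.Base.L.textLo, ProgX.Base.L.textHi] side (v_side)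
  have hs : Mem.SameExcept [] v.mem s_10886b.mem := by
    rw [w_mem]
    exact Mem.SameExcept.refl _ _
  have habi : (conv u₀).inv s_10886b := by
    refine ProgX.Base.abiInv_of ?_ ?_
    · rw [w_flags]
      exact hdf
    · rw [w_mxcsr]
      exact hmx
  obtain ⟨kcore, kcursor, kconsts⟩ :=
    o2_core_carry (cut' := Gif.L.DGifOpen.at_108816) hcore hcursor hconsts hs (fun w hw => absurd hw List.not_mem_nil)
      w_rip w_rsp (w_kept.get .r12 rfl) (ProgX.Base.conv_code_in w_eq) habi
  refine ReachVia.done ⟨Hc, ?_⟩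
  exact {
    core := kcore
    region := hregion
    inv := by
      rw [w_mem]
      exact hinv
    cursor := kcursor
    consts := kconsts
    res := by
      left
      rw [w_rbx]
      rfl
  }

/-- **108729H (ret5) … the call of memset … 108747H (ret6)**, `calloc` returned the private object (dgif_lib.c:186-194):
`Private = rax`, not NULL, `memset(Private, 0, sizeof(GifFilePrivateType))`. -/
theorem o2_seg_memset (Lay : Layout) (hLay : Lay.hi = 0x1000000) (μ : Microarch) (hμ : UserX.MicroOK μ) (u₀ : State)
    (hcode : HasCodeNat Lay u₀ Gif.L.DGifOpen.entry Gif.Code.code_DGifOpen.nat Gif.L.DGifOpen.size)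
    (H : Heap) (rest : List Obj) (frames : List (Nat × FrameLayout)) (R : Rd) (Hc : Heap) (gif pv : Nat) (e : State) (ret : Word)
    (h_memset : Calls Lay μ ProgX.Base.WayInv (ProgX.Base.conv u₀) ProgX.Base.L.memset.entry
      (ProgX.Base.Spec.memset.spec (Hc.liveObjs ++ rest) (DGifOpen.framesIn frames e)))
    (v : State) (hat : o2_Got Gif.L.DGifOpen.ret5 .rax H rest frames R Hc gif pv u₀ e ret v) :
    ReachVia Lay μ ProgX.Base.WayInv v (o2_Got Gif.L.DGifOpen.ret6 .rbp H rest frames R Hc gif pv u₀ e ret) := by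
  obtain ⟨hcore, c_r13, c_r14, c_r15, c_rbx, hptr, hregion, hinv, hown, hzero, hcursor, hconsts⟩ := hat
  have he := hcore.entry
  v_entry he
  obtain ⟨hheap, hctx, hcur0, hconsts0, hrdi, hrsi, herr⟩ := hcore.pre
  have w_rip := hcore.rip
  have c_rsp : v.reg .rsp = e.reg .rsp - 120 := hcore.rsp
  obtain ⟨z, c_rax⟩ : ∃ z, v.reg .rax = z := ⟨_, rfl⟩
  rw [c_rax] at hptr
  have w_kept : RegsKept [.rsp] v v := RegsKept.refl _ _
  have w_eq : Mem.EqOn ProgX.Base.L.textLo ProgX.Base.L.textHi u₀.mem v.mem := ProgX.Base.conv_code_eqOn hcore.code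
  have hdf := (show abiInv _ from hcore.abi).1
  have hmx := (show abiInv _ from hcore.abi).2
  have hsse := ProgX.Base.sseOK_of_abiInv hcore.abi
  have hcur := hctx.cursor_range hheap.inv.shadow
  have hbasec : Hc.base = 0x800000 := hregion.1.trans hheap.base
  have hlimitc : Hc.limit = 0xC00000 := hregion.2.trans hheap.limit
  -- where gif and pv are, as numbers
  have hgin := hown.inside hinv.heap (o := (gif, 120)) List.mem_cons_self
  have hpin := hown.inside hinv.heap (o := (pv, 24936)) (List.mem_cons_of_mem _ List.mem_cons_self)
  simp only at hgin hpin
  rw [hbasec] at hgin hpin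
  have hg1 := hgin.1
  have hg2 := hgin.2.2.2.2
  have hp1 := hpin.1
  have hp2 := hpin.2.2.2.2
  clear hgin hpin
  have hpvlive : Hc.Live pv 24936 := hown.live (pv, 24936) (List.mem_cons_of_mem _ List.mem_cons_self)
  u_walk hcode [hμ.vendor] until [Gif.L.DGifOpen.ret6] span [ProgX.Base.L.textLo, ProgX.Base.L.textHi] side (v_side)
  case call_inv =>
    v_inv
  case pre_108742 =>
    -- memset's precondition: the shadow clause from the heap's invariant over the pushed return address; the range is the new object
    have e_rsp : (s_108742.reg .rsp).toNat + 8 = (e.reg .rsp).toNat - 120 := by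
      rw [w_rsp]
      u_omega
    have hpre : HeapPre Hc rest (DGifOpen.framesIn frames e) s_108742 := by
      refine ⟨?_, hbasec, hlimitc, hheap.text, hheap.offText⟩
      rw [e_rsp, w_mem]
      exact hinv.writeLE_out _ _ _ (by u_omega) (by rw [hbasec]; left; u_omega) (by left; u_omega)
    refine ⟨hpre.shadowPre, Or.inr ?_⟩
    rw [w_rdi, w_rdx, hptr]
    exact hpvlive.liveIn rest _ (Nat.le_refl _) (Nat.le_refl _)
  -- 0x108747 (ret6): memset has returned
  obtain ⟨hrax, hun, _⟩ := w_post
  have e_top : (s_108742.reg .rsp).toNat + 8 = (e.reg .rsp).toNat - 120 := by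
    rw [w_rsp_108742]
    u_omega
  have e_dx : (s_108742.reg .rdx).toNat = 24936 := by
    rw [w_rdx_108742]
    decide
  -- the heap's invariant: at memset's entry (one more return address), then through its footprint (stack and the live object)
  have hinv0 : HeapInv Hc rest (DGifOpen.framesIn frames e) ((e.reg .rsp).toNat - 120) s_108742.mem := by
    rw [w_mem_108742]
    exact hinv.writeLE_out _ _ _ (by u_omega) (by rw [hbasec]; left; u_omega) (by left; u_omega)
  have hsame0 := w_same
  simp only [X86.User.Spec.footprint, vspec] at hsame0
  have hinv1 : HeapInv Hc rest (DGifOpen.framesIn frames e) ((e.reg .rsp).toNat - 120) s_108742r.mem := by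
    refine hinv0.sameExcept_stack_live hbasec hun ?_ hpvlive ?_ ?_ hsame0
    · rw [w_rsp_108742]
      u_omega
    · rw [w_rdi_108742, hptr]
      exact Nat.le_refl _
    · rw [w_rdi_108742, hptr, e_dx]
      exact Nat.le_refl _
  clear hsame0
  v_after_call w_rsp_108742 w_mem_108742
  simp only [w_rdi_108742, hptr, e_dx] at w_same
  have hs : Mem.SameExcept
      [⟨(e.reg .rsp).toNat - 528, (e.reg .rsp).toNat - 120⟩,
       ⟨pv, pv + 24936⟩] v.mem s_108742r.mem := by u_same
  have hwin : ∀ w, w ∈ [(⟨(e.reg .rsp).toNat - 528, (e.reg .rsp).toNat - 120⟩ : Span),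
       ⟨pv, pv + 24936⟩] → o2_Win e w := by
    intro w hw
    unfold o2_Win
    simp only [List.mem_cons, List.not_mem_nil, or_false] at hw
    rcases hw with rfl | rfl
    · left
      simp only
      omega
    · right
      left
      simp only
      omega
  obtain ⟨kcore, kcursor, kconsts⟩ :=
    o2_core_carry (cut' := Gif.L.DGifOpen.ret6) hcore hcursor hconsts hs hwin w_rip w_rsp (w_kept.get .r12 rfl) w_code w_inv
  -- the six zero fields of gif: pv is another object
  have hfar := hown.far hinv.heap (a := (gif, 120)) (b := (pv, 24936)) List.mem_cons_self
    (List.mem_cons_of_mem _ List.mem_cons_self) (by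
      intro heq
      have := congrArg Prod.snd heq
      simp only at this
      omega)
  simp only at hfar
  have kzero : DGifOpen.GifZero s_108742r.mem gif := by
    apply o2_zero_carry hzero hs (by omega)
    intro w hw
    simp only [List.mem_cons, List.not_mem_nil, or_false] at hw
    rcases hw with rfl | rfl
    · simp only
      omega
    · simp only
      omega
  refine ReachVia.done ?_
  exact {
    core := kcore
    r13 := (w_kept.get .r13 rfl).trans c_r13
    r14 := (w_kept.get .r14 rfl).trans c_r14
    r15 := (w_kept.get .r15 rfl).trans c_r15
    rbx := by
      rw [w_kept.get .rbx rfl]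
      exact c_rbx
    ptr := by
      rw [w_rbp]
      exact hptr
    region := hregion
    inv := hinv1
    own := hown
    zero := kzero
    cursor := kcursor
    consts := kconsts
  }

/-- **108747H (ret6) … 10879EH** (dgif_lib.c:196-202): THE SIX CHECKED STORES that make the reader. -/
theorem o2_seg_stores (Lay : Layout) (hLay : Lay.hi = 0x1000000) (μ : Microarch) (hμ : UserX.MicroOK μ) (u₀ : State)
    (hcode : HasCodeNat Lay u₀ Gif.L.DGifOpen.entry Gif.Code.code_DGifOpen.nat Gif.L.DGifOpen.size)
    (H : Heap) (rest : List Obj) (frames : List (Nat × FrameLayout)) (R : Rd) (Hc : Heap) (gif pv : Nat) (e : State) (ret : Word)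
    (h_asan_store8_noabort : Asan.SmallCheck Lay μ ProgX.Base.WayInv (ProgX.Base.CodeOK u₀) [.rax, .rcx, .rdx] 8
      ProgX.Base.L.__asan_store8_noabort.entry)
    (h_asan_store4_noabort : Asan.SmallCheck Lay μ ProgX.Base.WayInv (ProgX.Base.CodeOK u₀) [.rax, .rcx, .rdx] 4
      ProgX.Base.L.__asan_store4_noabort.entry)
    (v : State) (hat : o2_Got Gif.L.DGifOpen.ret6 .rbp H rest frames R Hc gif pv u₀ e ret v) :
    ReachVia Lay μ ProgX.Base.WayInv v (DGifOpen.Opened Gif.L.DGifOpen.at_10879e H rest frames R Hc gif pv u₀ e ret) := by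
  obtain ⟨hcore, c_r13, c_r14, c_r15, hrbx, hptr, hregion, hinv, hown, hzero, hcursor, hconsts⟩ := hat
  have he := hcore.entry
  v_entry he
  obtain ⟨hheap, hctx, hcur0, hconsts0, hrdi, hrsi, herr⟩ := hcore.pre
  have w_rip := hcore.rip
  have c_rsp : v.reg .rsp = e.reg .rsp - 120 := hcore.rsp
  obtain ⟨g, c_rbx⟩ : ∃ g, v.reg .rbx = g := ⟨_, rfl⟩
  obtain ⟨z, c_rbp⟩ : ∃ z, v.reg .rbp = z := ⟨_, rfl⟩
  rw [c_rbx] at hrbx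
  rw [c_rbp] at hptr
  have w_kept : RegsKept [.rsp] v v := RegsKept.refl _ _
  have w_eq : Mem.EqOn ProgX.Base.L.textLo ProgX.Base.L.textHi u₀.mem v.mem := ProgX.Base.conv_code_eqOn hcore.code
  have hdf := (show abiInv _ from hcore.abi).1
  have hmx := (show abiInv _ from hcore.abi).2
  have hsse := ProgX.Base.sseOK_of_abiInv hcore.abi
  have hcur := hctx.cursor_range hheap.inv.shadow
  have hbasec : Hc.base = 0x800000 := hregion.1.trans hheap.base
  have hlimitc : Hc.limit = 0xC00000 := hregion.2.trans hheap.limit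
  -- where gif and pv are, as numbers
  have hgin := hown.inside hinv.heap (o := (gif, 120)) List.mem_cons_self
  have hpin := hown.inside hinv.heap (o := (pv, 24936)) (List.mem_cons_of_mem _ List.mem_cons_self)
  simp only at hgin hpin
  rw [hbasec] at hgin hpin
  have hg1 := hgin.1
  have hg2 := hgin.2.2.2.2
  have hp1 := hpin.1
  have hp2 := hpin.2.2.2.2
  clear hgin hpin
  have hgl : LiveIn (Hc.liveObjs ++ rest) (DGifOpen.framesIn frames e) gif 120 :=
    (hown.live (gif, 120) List.mem_cons_self).liveIn rest _ (Nat.le_refl _) (Nat.le_refl _)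
  have hpl : LiveIn (Hc.liveObjs ++ rest) (DGifOpen.framesIn frames e) pv 24936 :=
    (hown.live (pv, 24936) (List.mem_cons_of_mem _ List.mem_cons_self)).liveIn rest _ (Nat.le_refl _) (Nat.le_refl _)
  u_walk hcode [hμ.vendor] until [Gif.L.DGifOpen.at_10879e] span [ProgX.Base.L.textLo, ProgX.Base.L.textHi] side (v_side)
  case check_10874b =>
    -- dgif_lib.c:196 the store of `GifFile->Private`: 8 bytes inside gif
    have hun : ShadowUntouched v.mem s_10874b.mem := by v_untouched
    exact hgl.accSmall hinv.shadow hun _ 8 (by decide) (by u_omega) (by u_omega)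
  case check_108758 =>
    -- dgif_lib.c:197 the store of `Private->FileHandle`: 4 bytes inside pv
    have hun : ShadowUntouched v.mem s_108758.mem := by v_untouched
    exact hpl.accSmall hinv.shadow hun _ 4 (by decide) (by u_omega) (by u_omega)
  case check_108768 =>
    -- dgif_lib.c:198 the store of `Private->File`
    have hun : ShadowUntouched v.mem s_108768.mem := by v_untouched
    exact hpl.accSmall hinv.shadow hun _ 8 (by decide) (by u_omega) (by u_omega)
  case check_108778 =>
    -- dgif_lib.c:199 the store of `Private->FileState`
    have hun : ShadowUntouched v.mem s_108778.mem := by v_untouched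
    exact hpl.accSmall hinv.shadow hun _ 4 (by decide) (by u_omega) (by u_omega)
  case check_108788 =>
    -- dgif_lib.c:201 the store of `Private->Read`
    have hun : ShadowUntouched v.mem s_108788.mem := by v_untouched
    exact hpl.accSmall hinv.shadow hun _ 8 (by decide) (by u_omega) (by u_omega)
  case check_108795 =>
    -- dgif_lib.c:202 the store of `GifFile->UserData`
    have hun : ShadowUntouched v.mem s_108795.mem := by v_untouched
    exact hgl.accSmall hinv.shadow hun _ 8 (by decide) (by u_omega) (by u_omega)
  -- 0x10879e: THE FOREST IS ESTABLISHED
  have hun : ShadowUntouched v.mem s_10879a.mem := by v_untouched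
  have hs : Mem.SameExcept
      [⟨(e.reg .rsp).toNat - 528, (e.reg .rsp).toNat - 120⟩,
       ⟨gif + 104, gif + 120⟩,
       ⟨pv, pv + 80⟩] v.mem s_10879a.mem := by
    rw [w_mem]
    u_same
  -- gif and pv are two objects: at least 64 bytes apart
  have hfar := hown.far hinv.heap (a := (gif, 120)) (b := (pv, 24936)) List.mem_cons_self
    (List.mem_cons_of_mem _ List.mem_cons_self) (by
      intro heq
      have := congrArg Prod.snd heq
      simp only at this
      omega)
  simp only at hfar
  -- the fields the six stores made, read back
  have f_priv : s_10879a.mem.readLE (g + 112) 8 = z.toNat := by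
    rw [w_mem]
    u_read
  have f_user : s_10879a.mem.readLE (g + 104) 8 = (e.reg .rdi).toNat := by
    rw [w_mem]
    u_read
  have f_read : s_10879a.mem.readLE (z + 72) 8 = (e.reg .rsi).toNat := by
    rw [w_mem]
    u_read
  have f_file : s_10879a.mem.readLE (z + 64) 8 = 0 := by
    rw [w_mem]
    u_read
  have f_state : s_10879a.mem.readLE z 4 = 8 := by
    rw [w_mem]
    u_read
  -- the heap's invariant: stack stores, and stores into the two live objects
  obtain ⟨cg, hlg⟩ := hown.live (gif, 120) List.mem_cons_self
  obtain ⟨cp, hlp⟩ := hown.live (pv, 24936) (List.mem_cons_of_mem _ List.mem_cons_self)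
  have hcg := hinv.heap.size_le_cap hlg
  have hcp := hinv.heap.size_le_cap hlp
  simp only at hcg hcp
  have hinv1 : HeapInv Hc rest (DGifOpen.framesIn frames e) ((e.reg .rsp).toNat - 120) s_10879a.mem := by
    apply hinv.sameExcept hun hs
    intro w hw
    simp only [List.mem_cons, List.not_mem_nil, or_false] at hw
    rcases hw with rfl | rfl | rfl
    · left
      left
      rw [hbasec]
      simp only
      omega
    · right
      refine ⟨_, hlg, ?_, ?_⟩
      · simp only
        omega
      · simp only
        omega
    · right
      refine ⟨_, hlp, ?_, ?_⟩
      · simp only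
        omega
      · simp only
        omega
  have hwin : ∀ w, w ∈ [(⟨(e.reg .rsp).toNat - 528, (e.reg .rsp).toNat - 120⟩ : Span),
       ⟨gif + 104, gif + 120⟩,
       ⟨pv, pv + 80⟩] → o2_Win e w := by
    intro w hw
    unfold o2_Win
    simp only [List.mem_cons, List.not_mem_nil, or_false] at hw
    rcases hw with rfl | rfl | rfl
    · left
      simp only
      omega
    · right
      left
      simp only
      omega
    · right
      left
      simp only
      omega
  have habi : (conv u₀).inv s_10879a := by
    refine ProgX.Base.abiInv_of ?_ ?_
    · rw [w_flags]
      exact w_df_108795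
    · rw [w_mxcsr]
      exact hmx
  obtain ⟨kcore, kcursor, kconsts⟩ :=
    o2_core_carry (cut' := Gif.L.DGifOpen.at_10879e) hcore hcursor hconsts hs hwin w_rip w_rsp (w_kept.get .r12 rfl)
      (ProgX.Base.conv_code_in w_eq) habi
  have kzero : DGifOpen.GifZero s_10879a.mem gif := by
    apply o2_zero_carry hzero hs (by omega)
    intro w hw
    simp only [List.mem_cons, List.not_mem_nil, or_false] at hw
    rcases hw with rfl | rfl | rfl
    · simp only
      omega
    · simp only
      omega
    · simp only
      omega
  -- THE SHAPE of the forest of gif and pv alone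
  have hshape : Shape (DGifOpen.fresh gif pv) R s_10879a.mem := {
    priv := by
      show GifFileType.Private s_10879a.mem gif = pv
      simp only [gfield]
      rw [← rd_eq_readLE s_10879a.mem (g + 112) (gif + 112) 8 (by u_omega), f_priv]
      exact hptr
    user := by
      show GifFileType.UserData s_10879a.mem gif = R.cur
      simp only [gfield]
      rw [← rd_eq_readLE s_10879a.mem (g + 104) (gif + 104) 8 (by u_omega), f_user]
      exact hrdi
    scm := kzero.scm
    icm := kzero.icm
    saved := ⟨kzero.saved, kzero.count⟩
    pend := ⟨kzero.exts, kzero.extCount⟩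
    read := by
      show GifFilePrivateType.Read s_10879a.mem pv = memReadEntry
      simp only [gfield]
      rw [← rd_eq_readLE s_10879a.mem (z + 72) (pv + 72) 8 (by u_omega), f_read]
      exact hrsi
    file := by
      show GifFilePrivateType.File s_10879a.mem pv = 0
      simp only [gfield]
      rw [← rd_eq_readLE s_10879a.mem (z + 64) (pv + 64) 8 (by u_omega), f_file]
    state := by
      show GifFilePrivateType.FileState s_10879a.mem pv = 8
      simp only [gfield]
      rw [← rd_eq_readLE s_10879a.mem z pv 4 hptr, f_state]
    cursor := kcursor
    consts := kconsts
  }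
  refine ReachVia.done ?_
  exact {
    core := kcore
    r13 := (w_kept.get .r13 rfl).trans c_r13
    rbx := by
      rw [w_kept.get .rbx rfl, c_rbx]
      exact hrbx
    rbp := by
      rw [w_kept.get .rbp rfl, c_rbp]
      exact hptr
    region := hregion
    inv := hinv1
    ok := ⟨hown, hshape⟩
  }

end Gif.Spec.DGifOpen_2
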